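-- pv_equiv track=rewrite | github.com/lfmendoza/direct-deterministic-finite-automaton | automaton/shunting_yard.py | _desugar
-- ===== SOURCE A (Python) =====
-- def _desugar(regex: str) -> str:
--     """Expande azucar sintactico: a+ -> a.a* y a? -> (a|ε)."""
--     result: list[str] = []
--     i = 0
--     while i < len(regex):
--         c = regex[i]
--         if c == "+":
--             # a+ se convierte en a.a*; si el token previo es ')' se duplica el grupo
--             if result and result[-1] == ")":
--                 depth = 1
--                 j = len(result) - 2
--                 while j >= 0 and depth > 0:
--                     if result[j] == ")":
--                         depth += 1
--                     elif result[j] == "(":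
--                         depth -= 1
--                     j -= 1
--                 group = result[j + 1 :]
--                 result.extend(["."] + list(group) + ["*"])
--             elif result:
--                 prev = result[-1]
--                 result.extend([".", prev, "*"])
--         elif c == "?":
--             # a? se convierte en (a|ε)
--             if result and result[-1] == ")":
--                 depth = 1
--                 j = len(result) - 2
--                 while j >= 0 and depth > 0:
--                     if result[j] == ")":
--                         depth += 1
--                     elif result[j] == "(":
--                         depth -= 1
--                     j -= 1
--                 group = result[j + 1 :]
--                 result[j + 1 :] = ["("] + list(group) + ["|", "ε", ")"]
--             elif result:
--                 prev = result.pop()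
--                 result.extend(["(", prev, "|", "ε", ")"])
--         else:
--             result.append(c)
--         i += 1
--     return "".join(result)
-- ===== SOURCE B (Python) =====
-- def _desugar(regex: str) -> str:
--     """Expande azucar sintactico: a+ -> a.a* y a? -> (a|e) — one forward pass.
--
--     Instead of scanning backwards for the matching '(' on every quantifier,
--     we maintain a stack of indices of currently-unmatched '(' while emitting,
--     so the start of the group ending at the current last ')' is known in O(1).
--     """
--     result: list[str] = []
--     opens: list[int] = []   # indices in result of unmatched '('
--     gs = 0                  # start of the group ending at result[-1] == ')'
--
--     def emit(ch: str) -> None: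
--         nonlocal gs
--         if ch == "(":
--             opens.append(len(result))
--         elif ch == ")":
--             gs = opens.pop() if opens else 0
--         result.append(ch)
--
--     for c in regex:
--         if c == "+":
--             if result and result[-1] == ")":
--                 result.extend(["."] + result[gs:] + ["*"])
--             elif result:
--                 prev = result[-1]
--                 emit(".")
--                 emit(prev)
--                 emit("*")
--         elif c == "?":
--             if result and result[-1] == ")":
--                 result[gs:] = ["("] + result[gs:] + ["|", "ε", ")"]
--             elif result:
--                 prev = result.pop()
--                 if prev == "(":
--                     opens.pop()
--                 for ch in ("(", prev, "|", "ε", ")"):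
--                     emit(ch)
--         else:
--             emit(c)
--     return "".join(result)
-- ===== Notes on version B (the rewrite author's own statement) =====
-- stated objective: alternative
-- what changed: B replaces A's backward depth-counting scan for the matching '(' (rerun at every '+'/'?') by a single forward pass that maintains a stack of unmatched '(' positions, so the start of the group ending at the current ')' is known in O(1).
import Mathlib
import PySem

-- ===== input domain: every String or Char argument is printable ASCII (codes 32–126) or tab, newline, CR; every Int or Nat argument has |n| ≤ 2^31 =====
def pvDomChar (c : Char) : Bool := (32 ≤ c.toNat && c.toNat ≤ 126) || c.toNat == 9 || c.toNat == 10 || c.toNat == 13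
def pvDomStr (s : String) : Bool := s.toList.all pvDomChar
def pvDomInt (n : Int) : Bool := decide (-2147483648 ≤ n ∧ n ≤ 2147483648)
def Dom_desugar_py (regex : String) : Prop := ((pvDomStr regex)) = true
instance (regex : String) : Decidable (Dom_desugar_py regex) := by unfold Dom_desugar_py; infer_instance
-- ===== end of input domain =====

-- B replaces A's repeated backward paren-matching scans by one forward pass that keeps a
-- stack of unmatched '(' positions (objective: alternative algorithm, same output).

-- ===== PORT A =====
-- A's `result` is a Python list of 1-character strings; it is modelled as List Char
-- (every element A ever appends is a single character); "".join(result) = String.ofList.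

-- A's inner `while j >= 0 and depth > 0` loop; returns the final j.
-- result[j] is in range whenever the loop body runs (0 ≤ j < len started from len-2),
-- so the `.getD ' '` default is never consulted; PySem.List.pyGet? is Python's r[j].
def aScanLoop (r : List Char) (depth : Int) (j : Int) : Int :=
  if h : 0 ≤ j ∧ 0 < depth then
    aScanLoop r
      (if (PySem.List.pyGet? r j).getD ' ' = ')' then depth + 1
       else if (PySem.List.pyGet? r j).getD ' ' = '(' then depth - 1
       else depth)
      (j - 1)
  else j
termination_by (j + 1).toNat
decreasing_by omega

-- one iteration of A's main `while i < len(regex)` loop body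
-- (`group = result[j+1:]` is PySem.List.slice … (some (j+1)) none;
--  the slice assignment `result[j+1:] = L` is result[:j+1] ++ L)
def aStep (result : List Char) (c : Char) : List Char :=
  if c = '+' then
    if result.getLast? = some ')' then          -- `result and result[-1] == ")"`
      result ++ ['.']
        ++ PySem.List.slice result (some (aScanLoop result 1 ((result.length : Int) - 2) + 1)) none
        ++ ['*']
    else if result ≠ [] then
      result ++ ['.', (result.getLast?).getD ' ', '*']   -- prev = result[-1]
    else result
  else if c = '?' then
    if result.getLast? = some ')' then
      PySem.List.slice result none (some (aScanLoop result 1 ((result.length : Int) - 2) + 1))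
        ++ ['(']
        ++ PySem.List.slice result (some (aScanLoop result 1 ((result.length : Int) - 2) + 1)) none
        ++ ['|', 'ε', ')']
    else if result ≠ [] then
      result.dropLast ++ ['(', (result.getLast?).getD ' ', '|', 'ε', ')']   -- prev = result.pop()
    else result
  else result ++ [c]

def desugar_py (regex : String) : String :=
  String.ofList (regex.toList.foldl aStep [])

-- ===== PORT B =====
-- B's state: the emitted output, the stack of indices of unmatched '(',
-- and gs = start of the group ending at the current last ')'.
structure BState where
  result : List Char
  opens  : List Nat
  gs     : Nat

-- Source B's `emit`
def emitB (s : BState) (ch : Char) : BState :=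
  if ch = '(' then ⟨s.result ++ [ch], s.opens ++ [s.result.length], s.gs⟩
  else if ch = ')' then ⟨s.result ++ [ch], s.opens.dropLast, (s.opens.getLast?).getD 0⟩
  else ⟨s.result ++ [ch], s.opens, s.gs⟩

-- one iteration of Source B's `for c in regex` body (result[gs:] with gs : Nat is List.drop)
def bStep (s : BState) (c : Char) : BState :=
  if c = '+' then
    if s.result.getLast? = some ')' then
      { s with result := s.result ++ ['.'] ++ s.result.drop s.gs ++ ['*'] }
    else if s.result ≠ [] then
      emitB (emitB (emitB s '.') ((s.result.getLast?).getD ' ')) '*'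
    else s
  else if c = '?' then
    if s.result.getLast? = some ')' then
      { s with result := s.result.take s.gs ++ ['('] ++ s.result.drop s.gs ++ ['|', 'ε', ')'] }
    else if s.result ≠ [] then
      ['(', (s.result.getLast?).getD ' ', '|', 'ε', ')'].foldl emitB
        ⟨s.result.dropLast,
         if (s.result.getLast?).getD ' ' = '(' then s.opens.dropLast else s.opens,
         s.gs⟩
    else s
  else emitB s c

def desugar_py_alt (regex : String) : String :=
  String.ofList (regex.toList.foldl bStep ⟨[], [], 0⟩).result

-- ===== PRECONDITION & SPEC =====
def Spec_desugar_py (regex : String) (out : String) : Prop := out = desugar_py_alt regex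
instance (regex : String) (out : String) : Decidable (Spec_desugar_py regex out) := by unfold Spec_desugar_py; infer_instance

-- ===== CLAIM (what is proved, stated in full; the proofs are below) =====
def Claim_equal_desugar_py : Prop := ∀ (regex : String), Dom_desugar_py regex → Spec_desugar_py regex (desugar_py regex)

-- ===== LEMMAS AND PROOFS =====

-- Semantic model of B's bookkeeping: fold over the emitted characters carrying
-- (position, stack of unmatched '(' positions, gs).
def runT : List Char → Nat → List Nat → Nat → List Nat × Nat
  | [], _, st, g => (st, g)
  | c :: cs, p, st, g =>
    if c = '(' then runT cs (p + 1) (st ++ [p]) g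
    else if c = ')' then runT cs (p + 1) st.dropLast ((st.getLast?).getD 0)
    else runT cs (p + 1) st g

theorem runT_append (a b : List Char) (p : Nat) (st : List Nat) (g : Nat) :
    runT (a ++ b) p st g = runT b (p + a.length) (runT a p st g).1 (runT a p st g).2 := by
  induction a generalizing p st g with
  | nil => simp [runT]
  | cons c cs ih =>
    simp only [List.cons_append, runT, List.length_cons]
    have hp : p + 1 + cs.length = p + (cs.length + 1) := by omega
    split_ifs <;> rw [ih, hp]

theorem runT_concat (r : List Char) (c : Char) (p : Nat) (st : List Nat) (g : Nat) :
    runT (r ++ [c]) p st g =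
      (if c = '(' then ((runT r p st g).1 ++ [p + r.length], (runT r p st g).2)
       else if c = ')' then ((runT r p st g).1.dropLast, ((runT r p st g).1.getLast?).getD 0)
       else runT r p st g) := by
  rw [runT_append]
  by_cases hc1 : c = '('
  · subst hc1; simp [runT]
  · by_cases hc2 : c = ')'
    · subst hc2; simp [runT]
    · simp [runT, hc1, hc2]

theorem rev_dropLast (l : List Nat) : l.dropLast.reverse = l.reverse.tail := by
  induction l using List.reverseRecOn with
  | nil => simp
  | append_singleton l a ih => simp

-- a segment is clean if it restores any surrounding stack (all its pops are its own pushes)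
def cleanT (w : List Char) : Prop := ∀ p st g, (runT w p st g).1 = st

-- a segment whose net stack effect is to discard (up to) d elements from the top
def survT (w : List Char) (d : Nat) : Prop :=
  ∀ p st g, (runT w p st g).1 = st.take (st.length - d)

theorem cleanT_nil : cleanT [] := by intro p st g; simp [runT]

theorem cleanT_single {c : Char} (h1 : c ≠ '(') (h2 : c ≠ ')') : cleanT [c] := by
  intro p st g; simp [runT, h1, h2]

theorem cleanT_append {a b : List Char} (ha : cleanT a) (hb : cleanT b) : cleanT (a ++ b) := by
  intro p st g
  rw [runT_append, ha]
  exact hb _ _ _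

theorem cleanT_wrap {b : List Char} (hb : cleanT b) : cleanT ('(' :: (b ++ [')'])) := by
  intro p st g
  have hsh : ('(' : Char) :: (b ++ [')']) = ['('] ++ b ++ [')'] := by simp
  rw [hsh, runT_concat, runT_append]
  simp [runT, hb _ _ _]

theorem cleanT_survT {w : List Char} (h : cleanT w) : survT w 0 := by
  intro p st g; rw [h]; simp

theorem survT_append {a b : List Char} {d₁ d₂ : Nat} (ha : survT a d₁) (hb : survT b d₂) :
    survT (a ++ b) (d₁ + d₂) := by
  intro p st g
  rw [runT_append, ha, hb]
  rw [List.take_take, List.length_take]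
  congr 1
  omega

theorem survT_close {a : List Char} {d : Nat} (ha : survT a d) : survT (a ++ [')']) (d + 1) := by
  intro p st g
  have h := ha p st g
  rw [runT_concat, if_neg (by decide : ¬ (')' : Char) = '('), if_pos rfl]
  show (runT a p st g).1.dropLast = st.take (st.length - (d + 1))
  rw [h, List.dropLast_eq_take, List.take_take, List.length_take]
  congr 1
  omega

theorem survT_open_cons {r : List Char} {d : Nat} (hd : survT r (d + 1)) :
    survT ('(' :: r) d := by
  intro p st g
  have h0 : runT ('(' :: r) p st g = runT r (p + 1) (st ++ [p]) g := by simp [runT]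
  rw [h0, hd]
  rw [List.take_append_of_le_length (by simp only [List.length_append, List.length_cons, List.length_nil]; omega)]
  congr 1
  simp only [List.length_append, List.length_cons, List.length_nil]
  omega

theorem survT_tail3 : survT ['|', 'ε', ')'] 1 := by
  intro p st g
  simp [runT, List.dropLast_eq_take]

theorem runT_tail3 (p : Nat) (st : List Nat) (g : Nat) :
    runT ['|', 'ε', ')'] p st g = (st.dropLast, (st.getLast?).getD 0) := by
  simp [runT]

-- decomposition of the output along its unmatched '(' positions (top of stack first)
def DecompRev : List Char → List Nat → Prop
  | r, [] => ∃ d, survT r d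
  | r, i :: O => ∃ a b, r = a ++ '(' :: b ∧ a.length = i ∧ cleanT b ∧ DecompRev a O

theorem decomp_runT : ∀ (O : List Nat) (r : List Char), DecompRev r O →
    (runT r 0 [] 0).1 = O.reverse := by
  intro O
  induction O with
  | nil =>
    intro r h
    obtain ⟨d, hd⟩ := h
    rw [hd]; simp
  | cons i O ih =>
    intro r h
    obtain ⟨a, b, hr, hl, hb, hd⟩ := h
    subst hr
    rw [show a ++ '(' :: b = a ++ (['('] ++ b) from by simp, runT_append, runT_append]
    simp only [runT]
    rw [hb, ih a hd]
    simp [hl]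

theorem decomp_append_clean {r : List Char} {O : List Nat} {w : List Char}
    (h : DecompRev r O) (hw : cleanT w) : DecompRev (r ++ w) O := by
  cases O with
  | nil =>
    obtain ⟨d, hd⟩ := h
    exact ⟨d + 0, survT_append hd (cleanT_survT hw)⟩
  | cons i O =>
    obtain ⟨a, b, hr, hl, hb, hd⟩ := h
    exact ⟨a, b ++ w, by rw [hr]; simp, hl, cleanT_append hb hw, hd⟩

theorem decomp_open {r : List Char} {O : List Nat} (h : DecompRev r O) :
    DecompRev (r ++ ['(']) (r.length :: O) :=
  ⟨r, [], by simp, rfl, cleanT_nil, h⟩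

theorem decomp_close {r : List Char} {O : List Nat} (h : DecompRev r O) :
    DecompRev (r ++ [')']) O.tail := by
  cases O with
  | nil =>
    obtain ⟨d, hd⟩ := h
    exact ⟨d + 1, survT_close hd⟩
  | cons i O =>
    obtain ⟨a, b, hr, hl, hb, hd⟩ := h
    cases O with
    | nil =>
      obtain ⟨d, hda⟩ := hd
      refine ⟨d + 0, ?_⟩
      have hsh : r ++ [')'] = a ++ ('(' :: (b ++ [')'])) := by rw [hr]; simp
      rw [hsh]
      exact survT_append hda (cleanT_survT (cleanT_wrap hb))
    | cons i' O' =>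
      obtain ⟨a', b', ha', hl', hb', hd'⟩ := hd
      refine ⟨a', b' ++ ('(' :: (b ++ [')'])), ?_, hl', cleanT_append hb' (cleanT_wrap hb), hd'⟩
      rw [hr, ha']
      simp

theorem cleanT_drop_char {b : List Char} {c : Char} (h1 : c ≠ '(') (h2 : c ≠ ')')
    (h : cleanT (b ++ [c])) : cleanT b := by
  intro p st g
  have hh := h p st g
  rwa [runT_concat, if_neg h1, if_neg h2] at hh

theorem survT_drop_char {b : List Char} {c : Char} {d : Nat} (h1 : c ≠ '(') (h2 : c ≠ ')')
    (h : survT (b ++ [c]) d) : survT b d := by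
  intro p st g
  have hh := h p st g
  rwa [runT_concat, if_neg h1, if_neg h2] at hh

theorem decomp_drop_char {r : List Char} {O : List Nat} {c : Char} (h1 : c ≠ '(') (h2 : c ≠ ')')
    (h : DecompRev (r ++ [c]) O) : DecompRev r O := by
  cases O with
  | nil =>
    obtain ⟨d, hd⟩ := h
    exact ⟨d, survT_drop_char h1 h2 hd⟩
  | cons i O =>
    obtain ⟨a, b, hr, hl, hb, hd⟩ := h
    cases b using List.reverseRecOn with
    | nil =>
      exfalso
      apply h1
      have hgl := congrArg List.getLast? hr
      simpa using hgl
    | append_singleton b₀ cb =>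
      have hsh : r ++ [c] = (a ++ '(' :: b₀) ++ [cb] := by rw [hr]; simp
      have hcb : cb = c := by
        have hgl := congrArg List.getLast? hsh
        rw [List.getLast?_concat, List.getLast?_concat] at hgl
        exact (Option.some_inj.mp hgl).symm
      subst hcb
      have hr' : r = a ++ '(' :: b₀ := by
        have hdl := congrArg List.dropLast hsh
        rw [List.dropLast_concat, List.dropLast_concat] at hdl
        exact hdl
      exact ⟨a, b₀, hr', hl, cleanT_drop_char h1 h2 hb, hd⟩

theorem decomp_drop_open {r : List Char} {O : List Nat}
    (h : DecompRev (r ++ ['(']) (r.length :: O)) : DecompRev r O := by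
  obtain ⟨a, b, hr, hl, hb, hd⟩ := h
  have hlen : b.length = 0 := by
    have hc := congrArg List.length hr
    simp at hc
    omega
  have hb0 : b = [] := List.eq_nil_of_length_eq_zero hlen
  subst hb0
  have hra : r = a := by
    have hdl := congrArg List.dropLast hr
    rw [List.dropLast_concat] at hdl
    simpa using hdl
  subst hra
  exact hd
theorem aScanLoop_ge_aux : ∀ (n : Nat) (r : List Char) (d j : Int),
    (j + 1).toNat ≤ n → -1 ≤ j → -1 ≤ aScanLoop r d j := by
  intro n
  induction n with
  | zero =>
    intro r d j hn hj
    have hj1 : j = -1 := by omega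
    subst hj1
    rw [aScanLoop, dif_neg (by omega)]
  | succ n ih =>
    intro r d j hn hj
    rw [aScanLoop]
    by_cases hcond : 0 ≤ j ∧ 0 < d
    · rw [dif_pos hcond]
      exact ih r _ (j - 1) (by omega) (by omega)
    · rw [dif_neg hcond]
      exact hj

theorem aScanLoop_ge (r : List Char) (d j : Int) (hj : -1 ≤ j) : -1 ≤ aScanLoop r d j :=
  aScanLoop_ge_aux (j + 1).toNat r d j le_rfl hj

theorem scan_eq : ∀ (u v : List Char) (d : Nat),
    aScanLoop (u ++ v) ((d : Int) + 1) ((u.length : Int) - 1) =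
      ((runT u 0 [] 0).1.reverse[d]?).elim (-1) (fun i => (i : Int) - 1) := by
  intro u
  induction u using List.reverseRecOn with
  | nil =>
    intro v d
    rw [aScanLoop]
    simp [runT]
  | append_singleton u₀ c ih =>
    intro v d
    have hlist : (u₀ ++ [c]) ++ v = u₀ ++ (c :: v) := by simp
    have hj : (((u₀ ++ [c]).length : Nat) : Int) - 1 = (u₀.length : Int) := by
      simp
    rw [hlist, hj, aScanLoop]
    rw [dif_pos (by constructor <;> omega)]
    simp only [PySem.List.pyGet?_append_length, Option.getD_some]
    have hXc := runT_concat u₀ c 0 [] 0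
    by_cases hc1 : c = '('
    · subst hc1
      rw [if_neg (by decide), if_pos rfl]
      rw [if_pos rfl] at hXc
      rw [hXc]
      cases d with
      | zero =>
        rw [aScanLoop, dif_neg (by omega)]
        simp
      | succ e =>
        have harith : ((e : Int) + 1 + 1 - 1) = (e : Int) + 1 := by omega
        rw [show ((Nat.succ e : Nat) : Int) + 1 - 1 = (e : Int) + 1 by push_cast; omega]
        rw [ih (('(' : Char) :: v) e]
        simp
    · by_cases hc2 : c = ')'
      · subst hc2
        rw [if_pos rfl]
        rw [if_neg (by decide), if_pos rfl] at hXc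
        rw [hXc]
        rw [show ((d : Int) + 1 + 1) = ((d + 1 : Nat) : Int) + 1 by push_cast; ring]
        rw [ih ((')' : Char) :: v) (d + 1)]
        rw [rev_dropLast, List.getElem?_tail]
      · rw [if_neg hc2, if_neg hc1]
        rw [if_neg hc1, if_neg hc2] at hXc
        rw [hXc]
        exact ih (c :: v) d
-- what is known about gs when the output ends with ')'
def GSP (r : List Char) (g : Nat) : Prop :=
  (∃ a b, r = a ++ '(' :: (b ++ [')']) ∧ a.length = g ∧ cleanT b ∧
      DecompRev a ((runT a 0 [] 0).1.reverse))
  ∨ (g = 0 ∧ ∃ d, survT r (d + 1))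

def InvB (s : BState) : Prop :=
  s.opens = (runT s.result 0 [] 0).1 ∧
  DecompRev s.result ((runT s.result 0 [] 0).1.reverse) ∧
  (s.result.getLast? = some ')' →
    s.gs = (runT s.result 0 [] 0).2 ∧ GSP s.result s.gs)

theorem emit_inv (s : BState) (c : Char)
    (h1 : s.opens = (runT s.result 0 [] 0).1)
    (h2 : DecompRev s.result ((runT s.result 0 [] 0).1.reverse)) :
    (emitB s c).result = s.result ++ [c] ∧
    (emitB s c).opens = (runT (s.result ++ [c]) 0 [] 0).1 ∧
    DecompRev (s.result ++ [c]) ((runT (s.result ++ [c]) 0 [] 0).1.reverse) ∧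
    (c = ')' → (emitB s c).gs = (runT (s.result ++ [c]) 0 [] 0).2 ∧
      GSP (s.result ++ [c]) (emitB s c).gs) := by
  have hX := runT_concat s.result c 0 [] 0
  by_cases hc1 : c = '('
  · subst hc1
    rw [if_pos rfl] at hX
    unfold emitB
    rw [if_pos rfl]
    refine ⟨rfl, ?_, ?_, by intro h; exact absurd h (by decide)⟩
    · rw [hX, h1]; simp
    · rw [hX]
      simpa using decomp_open h2
  · by_cases hc2 : c = ')'
    · subst hc2
      rw [if_neg (by decide), if_pos rfl] at hX
      unfold emitB
      rw [if_neg (by decide), if_pos rfl]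
      rcases List.eq_nil_or_concat (runT s.result 0 [] 0).1 with hXn | ⟨X₀, i, hXc⟩
      · refine ⟨rfl, ?_, ?_, ?_⟩
        · simp [hX, h1, hXn]
        · rw [hX, hXn]
          simp only [List.dropLast_nil, List.reverse_nil]
          rw [hXn] at h2
          simp only [List.reverse_nil] at h2
          obtain ⟨d, hd⟩ := h2
          exact ⟨d + 1, survT_close hd⟩
        · intro _
          constructor
          · simp [hX, h1, hXn]
          · right
            refine ⟨by rw [h1, hXn]; simp, ?_⟩
            rw [hXn] at h2
            simp only [List.reverse_nil] at h2
            obtain ⟨d, hd⟩ := h2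
            exact ⟨d, survT_close hd⟩
      · rw [List.concat_eq_append] at hXc
        rw [hXc] at h2
        rw [List.reverse_concat] at h2
        obtain ⟨a, b, hr, hl, hb, hd⟩ := h2
        refine ⟨rfl, ?_, ?_, ?_⟩
        · simp [hX, h1, hXc]
        · rw [hX, hXc]
          simp only [List.dropLast_concat]
          have hdc := decomp_close (show DecompRev s.result ((i :: X₀.reverse)) from ⟨a, b, hr, hl, hb, hd⟩)
          simpa [rev_dropLast, hXc] using hdc
        · intro _
          constructor
          · simp [hX, h1, hXc]
          · left
            refine ⟨a, b, by rw [hr]; simp, ?_, hb, ?_⟩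
            · rw [h1, hXc]; simp [hl]
            · have hra := decomp_runT _ _ hd
              rw [hra]
              simpa using hd
    · unfold emitB
      rw [if_neg hc1, if_neg hc2]
      rw [if_neg hc1, if_neg hc2] at hX
      refine ⟨rfl, ?_, ?_, by intro h; exact absurd h hc2⟩
      · rw [hX, h1]
      · rw [hX]
        exact decomp_append_clean h2 (cleanT_single hc1 hc2)

theorem start_eq (r : List Char) (hr : r.getLast? = some ')') :
    (aScanLoop r 1 ((r.length : Int) - 2) + 1).toNat = (runT r 0 [] 0).2 := by
  have hne : r ≠ [] := by intro h; simp [h] at hr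
  have hgl : r.getLast hne = ')' := by
    have hthis := List.getLast?_eq_some_getLast hne
    rw [hthis] at hr
    exact Option.some_inj.mp hr.symm |>.symm
  have hru : r = r.dropLast ++ [')'] := by
    conv_lhs => rw [← List.dropLast_append_getLast hne]
    rw [hgl]
  rw [hru]
  have hlen : (((r.dropLast ++ [')']).length : Nat) : Int) - 2 = ((r.dropLast).length : Int) - 1 := by
    simp
    omega
  rw [hlen]
  have hs := scan_eq r.dropLast [')'] 0
  simp only [Nat.cast_zero, zero_add] at hs
  rw [hs]
  rw [runT_concat]
  rw [if_neg (by decide : ¬ (')' : Char) = '('), if_pos rfl]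
  have hgl2 : (runT r.dropLast 0 [] 0).1.getLast? = (runT r.dropLast 0 [] 0).1.reverse[0]? := by
    rw [← List.head?_reverse]
    rw [List.head?_eq_getElem?]
  rw [hgl2]
  cases hx : (runT r.dropLast 0 [] 0).1.reverse[0]? with
  | none => simp
  | some i => simp

@[simp] theorem emitB_result (s : BState) (c : Char) :
    (emitB s c).result = s.result ++ [c] := by
  unfold emitB
  split_ifs <;> rfl

theorem step_equiv (s : BState) (c : Char) (h : InvB s) :
    aStep s.result c = (bStep s c).result ∧ InvB (bStep s c) := by
  obtain ⟨h1, h2, h3⟩ := h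
  by_cases hplus : c = '+'
  · subst hplus
    by_cases hlast : s.result.getLast? = some ')'
    · -- '+' applied to a group: both sides duplicate result[gs:]
      obtain ⟨hgs, hGSP⟩ := h3 hlast
      have hne : s.result ≠ [] := by intro hh; simp [hh] at hlast
      have hnn : (0:Int) ≤ aScanLoop s.result 1 ((s.result.length : Int) - 2) + 1 := by
        have hpos : 0 < s.result.length := List.length_pos_of_ne_nil hne
        have hge := aScanLoop_ge s.result 1 ((s.result.length : Int) - 2) (by omega)
        omega
      have hstart : (aScanLoop s.result 1 ((s.result.length : Int) - 2) + 1).toNat = s.gs := by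
        rw [start_eq s.result hlast, hgs]
      have hslice : PySem.List.slice s.result
          (some (aScanLoop s.result 1 ((s.result.length : Int) - 2) + 1)) none
          = s.result.drop s.gs := by
        rw [PySem.List.slice_from _ hnn, hstart]
      have hA : aStep s.result '+' = s.result ++ ['.'] ++ s.result.drop s.gs ++ ['*'] := by
        unfold aStep
        rw [if_pos rfl, if_pos hlast, hslice]
      have hB : bStep s '+' =
          { s with result := s.result ++ ['.'] ++ s.result.drop s.gs ++ ['*'] } := by
        unfold bStep
        rw [if_pos rfl, if_pos hlast]
      refine ⟨by rw [hA, hB], ?_⟩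
      rw [hB]
      rcases hGSP with ⟨a, b, hra, hla, hb, hd⟩ | ⟨hg0, d, hd⟩
      · -- matched group: the copied segment is clean
        have hdrop : s.result.drop s.gs = '(' :: (b ++ [')']) := by
          rw [hra, ← hla]
          exact List.drop_left
        have hsh : s.result ++ ['.'] ++ s.result.drop s.gs ++ ['*']
            = s.result ++ (['.'] ++ ('(' :: (b ++ [')'])) ++ ['*']) := by
          rw [hdrop]; simp
        have hw : cleanT (['.'] ++ ('(' :: (b ++ [')'])) ++ ['*']) :=
          cleanT_append (cleanT_append (cleanT_single (by decide) (by decide))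
            (cleanT_wrap hb)) (cleanT_single (by decide) (by decide))
        have hst : (runT (s.result ++ ['.'] ++ s.result.drop s.gs ++ ['*']) 0 [] 0).1
            = (runT s.result 0 [] 0).1 := by
          rw [hsh, runT_append]
          exact hw _ _ _
        refine ⟨by rw [hst]; exact h1, ?_, ?_⟩
        · show DecompRev _ _
          rw [hst, hsh]
          exact decomp_append_clean h2 hw
        · intro habs
          rw [List.getLast?_concat] at habs
          simp at habs
      · -- no matching '(' left of the final ')': gs = 0, the whole output is copied
        rw [hg0]
        simp only [List.drop_zero]
        have hall : survT (s.result ++ ['.'] ++ s.result ++ ['*'])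
            ((((d + 1) + 0) + (d + 1)) + 0) :=
          survT_append (survT_append
            (survT_append hd (cleanT_survT (cleanT_single (by decide) (by decide)))) hd)
            (cleanT_survT (cleanT_single (by decide) (by decide)))
        have hst : (runT (s.result ++ ['.'] ++ s.result ++ ['*']) 0 [] 0).1 = [] := by
          have hh := hall 0 [] 0; simpa using hh
        have hX0 : (runT s.result 0 [] 0).1 = [] := by
          have hh := hd 0 [] 0; simpa using hh
        refine ⟨by rw [hst, h1, hX0], ?_, ?_⟩
        · show DecompRev _ _
          rw [hst]
          exact ⟨_, hall⟩
        · intro habs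
          rw [List.getLast?_concat] at habs
          simp at habs
    · by_cases hnil : s.result = []
      · have hA : aStep s.result '+' = s.result := by
          unfold aStep
          rw [if_pos rfl, if_neg hlast, if_neg (by simp [hnil])]
        have hB : bStep s '+' = s := by
          unfold bStep
          rw [if_pos rfl, if_neg hlast, if_neg (by simp [hnil])]
        exact ⟨by rw [hA, hB], by rw [hB]; exact ⟨h1, h2, h3⟩⟩
      · -- '+' after a single (non-')') character
        have hA : aStep s.result '+' =
            s.result ++ ['.', (s.result.getLast?).getD ' ', '*'] := by
          unfold aStep
          rw [if_pos rfl, if_neg hlast, if_pos (by simp [hnil])]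
        have hB : bStep s '+' =
            emitB (emitB (emitB s '.') ((s.result.getLast?).getD ' ')) '*' := by
          unfold bStep
          rw [if_pos rfl, if_neg hlast, if_pos (by simp [hnil])]
        obtain ⟨-, eo1, ed1, -⟩ := emit_inv s '.' h1 h2
        obtain ⟨-, eo2, ed2, -⟩ := emit_inv (emitB s '.') ((s.result.getLast?).getD ' ')
          (by simp only [emitB_result]; exact eo1) (by simp only [emitB_result]; exact ed1)
        simp only [emitB_result] at eo2 ed2
        obtain ⟨-, eo3, ed3, -⟩ :=
          emit_inv (emitB (emitB s '.') ((s.result.getLast?).getD ' ')) '*'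
          (by simp only [emitB_result]; exact eo2)
          (by simp only [emitB_result]; exact ed2)
        simp only [emitB_result] at eo3 ed3
        refine ⟨by rw [hA, hB]; simp only [emitB_result]; simp, ?_⟩
        rw [hB]
        refine ⟨?_, ?_, ?_⟩
        · simp only [emitB_result]
          exact eo3
        · show DecompRev _ _
          simp only [emitB_result]
          exact ed3
        · intro habs
          rw [emitB_result, List.getLast?_concat] at habs
          simp at habs
  · by_cases hquest : c = '?'
    · subst hquest
      by_cases hlast : s.result.getLast? = some ')'
      · -- '?' applied to a group: both sides wrap result[gs:]
        obtain ⟨hgs, hGSP⟩ := h3 hlast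
        have hne : s.result ≠ [] := by intro hh; simp [hh] at hlast
        have hnn : (0:Int) ≤ aScanLoop s.result 1 ((s.result.length : Int) - 2) + 1 := by
          have hpos : 0 < s.result.length := List.length_pos_of_ne_nil hne
          have hge := aScanLoop_ge s.result 1 ((s.result.length : Int) - 2) (by omega)
          omega
        have hstart : (aScanLoop s.result 1 ((s.result.length : Int) - 2) + 1).toNat = s.gs := by
          rw [start_eq s.result hlast, hgs]
        have hslice : PySem.List.slice s.result
            (some (aScanLoop s.result 1 ((s.result.length : Int) - 2) + 1)) none
            = s.result.drop s.gs := by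
          rw [PySem.List.slice_from _ hnn, hstart]
        have hslice2 : PySem.List.slice s.result none
            (some (aScanLoop s.result 1 ((s.result.length : Int) - 2) + 1))
            = s.result.take s.gs := by
          rw [PySem.List.slice_to _ hnn, hstart]
        have hA : aStep s.result '?' =
            s.result.take s.gs ++ ['('] ++ s.result.drop s.gs ++ ['|', 'ε', ')'] := by
          unfold aStep
          rw [if_neg (by decide), if_pos rfl, if_pos hlast, hslice, hslice2]
        have hB : bStep s '?' =
            { s with result := s.result.take s.gs ++ ['('] ++ s.result.drop s.gs
                ++ ['|', 'ε', ')'] } := by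
          unfold bStep
          rw [if_neg (by decide), if_pos rfl, if_pos hlast]
        refine ⟨by rw [hA, hB], ?_⟩
        rw [hB]
        rcases hGSP with ⟨a, b, hra, hla, hb, hd⟩ | ⟨hg0, d, hd⟩
        · -- matched group
          have hdrop : s.result.drop s.gs = '(' :: (b ++ [')']) := by
            rw [hra, ← hla]
            exact List.drop_left
          have htake : s.result.take s.gs = a := by
            rw [hra, ← hla]
            exact List.take_left
          have hXSa : (runT s.result 0 [] 0).1 = (runT a 0 [] 0).1 := by
            rw [hra, runT_append]
            exact (cleanT_wrap hb) _ _ _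
          have hpre : (runT (s.result.take s.gs ++ ['('] ++ s.result.drop s.gs) 0 [] 0).1
              = (runT a 0 [] 0).1 ++ [a.length] := by
            rw [htake, hdrop, runT_append, (cleanT_wrap hb) _ _ _, runT_concat, if_pos rfl]
            simp
          have hfull : runT (s.result.take s.gs ++ ['('] ++ s.result.drop s.gs
              ++ ['|', 'ε', ')']) 0 [] 0 = ((runT a 0 [] 0).1, a.length) := by
            rw [runT_append, runT_tail3, hpre]
            simp
          refine ⟨?_, ?_, ?_⟩
          · rw [hfull, h1, hXSa]
          · show DecompRev _ _
            rw [hfull]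
            have hsh : s.result.take s.gs ++ ['('] ++ s.result.drop s.gs ++ ['|', 'ε', ')']
                = a ++ ('(' :: ((('(' :: (b ++ [')'])) ++ ['|', 'ε']) ++ [')'])) := by
              rw [htake, hdrop]; simp
            rw [hsh]
            exact decomp_append_clean hd
              (cleanT_wrap (cleanT_append (cleanT_wrap hb)
                (cleanT_append (cleanT_single (by decide) (by decide))
                  (cleanT_single (by decide) (by decide)))))
          · intro _
            refine ⟨by rw [hfull, ← hla], ?_⟩
            left
            refine ⟨a, ('(' :: (b ++ [')'])) ++ ['|', 'ε'], ?_, hla, ?_, hd⟩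
            · rw [htake, hdrop]; simp
            · exact cleanT_append (cleanT_wrap hb)
                (cleanT_append (cleanT_single (by decide) (by decide))
                  (cleanT_single (by decide) (by decide)))
        · -- no matching '(' : the whole output is wrapped
          rw [hg0]
          simp only [List.take_zero, List.drop_zero, List.nil_append]
          have hop : survT ('(' :: s.result) d := survT_open_cons hd
          have hall : survT (('(' :: s.result) ++ ['|', 'ε', ')']) (d + 1) :=
            survT_append hop survT_tail3
          have hst1 : (runT ('(' :: s.result) 0 [] 0).1 = [] := by
            have hh : runT ('(' :: s.result) 0 [] 0 = runT s.result 1 [0] 0 := by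
              simp [runT]
            rw [hh]
            have := hd 1 [0] 0
            simpa using this
          have hfull : runT (('(' :: s.result) ++ ['|', 'ε', ')']) 0 [] 0 = ([], 0) := by
            rw [runT_append, runT_tail3, hst1]
            simp
          have hX0 : (runT s.result 0 [] 0).1 = [] := by
            have hh := hd 0 [] 0; simpa using hh
          have hsh : (['('] ++ s.result ++ ['|', 'ε', ')'] : List Char)
              = ('(' :: s.result) ++ ['|', 'ε', ')'] := by simp
          rw [hsh]
          refine ⟨?_, ?_, ?_⟩
          · rw [hfull, h1, hX0]
          · show DecompRev _ _
            rw [hfull]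
            exact ⟨d + 1, hall⟩
          · intro _
            exact ⟨by rw [hfull], Or.inr ⟨rfl, d, hall⟩⟩
      · by_cases hnil : s.result = []
        · have hA : aStep s.result '?' = s.result := by
            unfold aStep
            rw [if_neg (by decide), if_pos rfl, if_neg hlast, if_neg (by simp [hnil])]
          have hB : bStep s '?' = s := by
            unfold bStep
            rw [if_neg (by decide), if_pos rfl, if_neg hlast, if_neg (by simp [hnil])]
          exact ⟨by rw [hA, hB], by rw [hB]; exact ⟨h1, h2, h3⟩⟩
        · -- '?' after a single (non-')') character prev: pop it, emit ( prev | ε )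
          have hA : aStep s.result '?' = s.result.dropLast
              ++ ['(', (s.result.getLast?).getD ' ', '|', 'ε', ')'] := by
            unfold aStep
            rw [if_neg (by decide), if_pos rfl, if_neg hlast, if_pos (by simp [hnil])]
          have hB : bStep s '?' =
              ['(', (s.result.getLast?).getD ' ', '|', 'ε', ')'].foldl emitB
                ⟨s.result.dropLast,
                 if (s.result.getLast?).getD ' ' = '(' then s.opens.dropLast else s.opens,
                 s.gs⟩ := by
            unfold bStep
            rw [if_neg (by decide), if_pos rfl, if_neg hlast, if_pos (by simp [hnil])]
          have hgl : s.result.getLast hnil = (s.result.getLast?).getD ' ' := by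
            rw [List.getLast?_eq_some_getLast hnil]
            rfl
          have hru : s.result = s.result.dropLast ++ [(s.result.getLast?).getD ' '] := by
            conv_lhs => rw [← List.dropLast_append_getLast hnil]
            rw [hgl]
          have hprev : (s.result.getLast?).getD ' ' ≠ ')' := by
            intro hp
            apply hlast
            rw [List.getLast?_eq_some_getLast hnil, hgl, hp]
          set prev := (s.result.getLast?).getD ' ' with hprevdef
          set s0 : BState := ⟨s.result.dropLast,
            if prev = '(' then s.opens.dropLast else s.opens, s.gs⟩ with hs0
          have h10 : s0.opens = (runT s0.result 0 [] 0).1 := by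
            show (if prev = '(' then s.opens.dropLast else s.opens)
              = (runT s.result.dropLast 0 [] 0).1
            have hXc : runT s.result 0 [] 0 = runT (s.result.dropLast ++ [prev]) 0 [] 0 := by
              rw [← hru]
            rw [runT_concat] at hXc
            by_cases hpo : prev = '('
            · rw [if_pos hpo]
              rw [if_pos hpo] at hXc
              rw [h1, hXc]
              simp
            · rw [if_neg hpo]
              rw [if_neg hpo, if_neg hprev] at hXc
              rw [h1, hXc]
          have h20 : DecompRev s0.result ((runT s0.result 0 [] 0).1.reverse) := by
            show DecompRev s.result.dropLast _
            have h2' : DecompRev (s.result.dropLast ++ [prev])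
                ((runT (s.result.dropLast ++ [prev]) 0 [] 0).1.reverse) := by
              rw [← hru]; exact h2
            by_cases hpo : prev = '('
            · rw [hpo] at h2'
              rw [runT_concat, if_pos rfl] at h2'
              simp only [List.reverse_concat] at h2'
              have h2'' : DecompRev (s.result.dropLast ++ ['('])
                  ((s.result.dropLast.length)
                    :: (runT s.result.dropLast 0 [] 0).1.reverse) := by
                simpa using h2'
              exact decomp_drop_open h2''
            · rw [runT_concat, if_neg hpo, if_neg hprev] at h2'
              exact decomp_drop_char hpo hprev h2'
          obtain ⟨-, eo1, ed1, -⟩ := emit_inv s0 '(' h10 h20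
          obtain ⟨-, eo2, ed2, -⟩ := emit_inv (emitB s0 '(') prev
            (by simp only [emitB_result]; exact eo1) (by simp only [emitB_result]; exact ed1)
          simp only [emitB_result] at eo2 ed2
          obtain ⟨-, eo3, ed3, -⟩ := emit_inv (emitB (emitB s0 '(') prev) '|'
            (by simp only [emitB_result]; exact eo2)
            (by simp only [emitB_result]; exact ed2)
          simp only [emitB_result] at eo3 ed3
          obtain ⟨-, eo4, ed4, -⟩ := emit_inv (emitB (emitB (emitB s0 '(') prev) '|') 'ε'
            (by simp only [emitB_result]; exact eo3)
            (by simp only [emitB_result]; exact ed3)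
          simp only [emitB_result] at eo4 ed4
          obtain ⟨-, eo5, ed5, eg5⟩ :=
            emit_inv (emitB (emitB (emitB (emitB s0 '(') prev) '|') 'ε') ')'
            (by simp only [emitB_result]; exact eo4)
            (by simp only [emitB_result]; exact ed4)
          obtain ⟨eg5a, eg5b⟩ := eg5 rfl
          have hfold : ['(', prev, '|', 'ε', ')'].foldl emitB s0
              = emitB (emitB (emitB (emitB (emitB s0 '(') prev) '|') 'ε') ')' := by
            simp [List.foldl]
          simp only [emitB_result] at eo5 ed5 eg5a eg5b
          refine ⟨?_, ?_⟩
          · rw [hA, hB, hfold]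
            simp only [emitB_result]
            simp [hs0]
          · rw [hB, hfold]
            refine ⟨?_, ?_, ?_⟩
            · simp only [emitB_result]
              exact eo5
            · show DecompRev _ _
              simp only [emitB_result]
              exact ed5
            · intro _
              constructor
              · simp only [emitB_result]
                exact eg5a
              · simp only [emitB_result]
                exact eg5b
    · -- an ordinary character is emitted
      have hA : aStep s.result c = s.result ++ [c] := by
        unfold aStep
        rw [if_neg hplus, if_neg hquest]
      have hB : bStep s c = emitB s c := by
        unfold bStep
        rw [if_neg hplus, if_neg hquest]
      obtain ⟨-, eo, ed, eg⟩ := emit_inv s c h1 h2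
      refine ⟨by rw [hA, hB, emitB_result], ?_⟩
      rw [hB]
      refine ⟨by rw [emitB_result]; exact eo, ?_, ?_⟩
      · show DecompRev _ _
        rw [emitB_result]
        exact ed
      · intro habs
        rw [emitB_result, List.getLast?_concat] at habs
        have hc2 : c = ')' := by simpa using habs
        obtain ⟨ega, egb⟩ := eg hc2
        constructor
        · rw [emitB_result]; exact ega
        · rw [emitB_result]; exact egb

theorem fold_equiv (l : List Char) (s : BState) (h : InvB s) :
    l.foldl aStep s.result = (l.foldl bStep s).result ∧ InvB (l.foldl bStep s) := by
  induction l generalizing s with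
  | nil => exact ⟨rfl, h⟩
  | cons c cs ih =>
    obtain ⟨he, hi⟩ := step_equiv s c h
    simpa [he] using ih (bStep s c) hi

-- ===== VERDICT (by name: the statement is the Claim_ definition above) =====
theorem desugar_py_spec : Claim_equal_desugar_py := by
  intro regex _
  unfold Spec_desugar_py desugar_py desugar_py_alt
  have h0 : InvB ⟨[], [], 0⟩ := by
    refine ⟨rfl, ⟨0, ?_⟩, by intro habs; simp at habs⟩
    intro p st g
    simp [runT]
  exact congrArg String.ofList (fold_equiv regex.toList ⟨[], [], 0⟩ h0).1
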